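-- pv_equiv track=rewrite | github.com/david3xu/azure-maintie-rag | backend/src/enhancement/query_analyzer.py | _identify_safety_considerations
-- ===== SOURCE A (Python) =====
-- from typing import Dict, List, Any, Optional, Tuple
--
-- def _identify_safety_considerations(entities: List[str], expanded_concepts: List[str]) -> List[str]:
--     """Identify safety considerations"""
--     all_terms = entities + expanded_concepts
--     safety_considerations = []
--
--     # High-risk equipment/activities
--     if any(term in ' '.join(all_terms).lower() for term in ['electrical', 'high voltage', 'power']):
--         safety_considerations.append('Electrical safety - lockout/tagout required')
--
--     if any(term in ' '.join(all_terms).lower() for term in ['pressure', 'hydraulic', 'pneumatic']):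
--         safety_considerations.append('Pressure system safety - proper isolation required')
--
--     if any(term in ' '.join(all_terms).lower() for term in ['rotating', 'motor', 'pump']):
--         safety_considerations.append('Rotating equipment safety - ensure complete stop')
--
--     if any(term in ' '.join(all_terms).lower() for term in ['chemical', 'fluid', 'oil']):
--         safety_considerations.append('Chemical safety - review MSDS and use proper PPE')
--
--     return safety_considerations
-- ===== SOURCE B (Python) =====
-- from typing import List
--
-- _RULES = [
--     (('electrical', 'high voltage', 'power'), 'Electrical safety - lockout/tagout required'),
--     (('pressure', 'hydraulic', 'pneumatic'), 'Pressure system safety - proper isolation required'),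
--     (('rotating', 'motor', 'pump'), 'Rotating equipment safety - ensure complete stop'),
--     (('chemical', 'fluid', 'oil'), 'Chemical safety - review MSDS and use proper PPE'),
-- ]
-- # characters a keyword can start with; any other scan position is skipped outright
-- _FIRST = frozenset(k[0] for keywords, _ in _RULES for k in keywords)
--
-- def _identify_safety_considerations(entities: List[str], expanded_concepts: List[str]) -> List[str]:
--     # Single left-to-right scan of the lowercased text: positions whose character cannot
--     # start a keyword are skipped; at the others each still-unmatched rule is tested for a
--     # keyword starting there; stop early once every rule has matched.
--     haystack = ' '.join(entities + expanded_concepts).lower()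
--     matched = [False] * len(_RULES)
--     for j, c in enumerate(haystack):
--         if c not in _FIRST:
--             continue
--         for i, (keywords, _) in enumerate(_RULES):
--             if not matched[i] and any(haystack.startswith(k, j) for k in keywords):
--                 matched[i] = True
--         if all(matched):
--             break
--     return [warning for hit, (_, warning) in zip(matched, _RULES) if hit]
-- ===== Notes on version B (the rewrite author's own statement) =====
-- stated objective: alternative
-- what changed: Instead of four independent substring ('in') searches over the re-joined text, B lowercases and joins the text once and makes a single left-to-right scan over its positions, skipping positions whose character cannot start any keyword, testing keyword prefixes at the rest into per-rule match flags, breaking once every rule has matched, and finally emitting the warnings of the matched rules in rule order.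
import Mathlib
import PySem

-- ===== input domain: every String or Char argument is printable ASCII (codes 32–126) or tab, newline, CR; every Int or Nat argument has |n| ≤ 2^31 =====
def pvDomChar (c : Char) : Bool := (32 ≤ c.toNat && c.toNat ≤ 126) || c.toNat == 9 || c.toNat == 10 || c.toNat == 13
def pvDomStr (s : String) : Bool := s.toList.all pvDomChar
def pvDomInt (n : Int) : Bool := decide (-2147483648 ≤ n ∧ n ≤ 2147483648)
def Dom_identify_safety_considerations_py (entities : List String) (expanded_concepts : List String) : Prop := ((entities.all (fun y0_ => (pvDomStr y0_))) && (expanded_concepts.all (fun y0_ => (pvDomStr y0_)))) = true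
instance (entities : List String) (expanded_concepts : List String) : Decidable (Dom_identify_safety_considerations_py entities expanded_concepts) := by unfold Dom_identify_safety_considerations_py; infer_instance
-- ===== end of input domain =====

-- B replaces A's four per-keyword substring searches with one left-to-right scan of the
-- lowercased text: positions whose character cannot start a keyword are skipped, the others are
-- tested for keyword prefixes into per-rule flags, stopping once all rules matched; objective: alternative.

-- ===== PORT A =====
-- literal transliteration: each `if` re-joins and re-lowercases all_terms, appends stay in order
def identify_safety_considerations_py (entities : List String) (expanded_concepts : List String) : List String :=
  let all_terms := entities ++ expanded_concepts
  let s0 : List String := []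
  let s1 := if (["electrical", "high voltage", "power"].any
      (fun term => PySem.Str.isIn term (PySem.Str.lower (PySem.Str.join " " all_terms)))) then
      s0 ++ ["Electrical safety - lockout/tagout required"] else s0
  let s2 := if (["pressure", "hydraulic", "pneumatic"].any
      (fun term => PySem.Str.isIn term (PySem.Str.lower (PySem.Str.join " " all_terms)))) then
      s1 ++ ["Pressure system safety - proper isolation required"] else s1
  let s3 := if (["rotating", "motor", "pump"].any
      (fun term => PySem.Str.isIn term (PySem.Str.lower (PySem.Str.join " " all_terms)))) then
      s2 ++ ["Rotating equipment safety - ensure complete stop"] else s2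
  let s4 := if (["chemical", "fluid", "oil"].any
      (fun term => PySem.Str.isIn term (PySem.Str.lower (PySem.Str.join " " all_terms)))) then
      s3 ++ ["Chemical safety - review MSDS and use proper PPE"] else s3
  s4

-- ===== PORT B =====
def pvKw1 : List String := ["electrical", "high voltage", "power"]
def pvKw2 : List String := ["pressure", "hydraulic", "pneumatic"]
def pvKw3 : List String := ["rotating", "motor", "pump"]
def pvKw4 : List String := ["chemical", "fluid", "oil"]
def pvWarnings : List String :=
  ["Electrical safety - lockout/tagout required",
   "Pressure system safety - proper isolation required",
   "Rotating equipment safety - ensure complete stop",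
   "Chemical safety - review MSDS and use proper PPE"]

-- the inner `for i, (keywords, _)` body at one scan position (suffix = haystack[j:])
def pvStep (kws : List String) (suf : List Char) (m : Bool) : Bool :=
  if !m && kws.any (fun k => PySem.Chars.startswith suf k.toList) then true else m

-- _FIRST: the characters a keyword can start with (a Python frozenset)
def pvFirst : PySem.Set Char :=
  PySem.Set.ofList ['e', 'h', 'p', 'p', 'h', 'p', 'r', 'm', 'p', 'c', 'f', 'o']

-- `for j, c in enumerate(haystack)`: structural recursion over the suffixes of the text;
-- positions with c ∉ _FIRST are skipped, and the loop breaks once all flags are set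
def pvScan : List Char → Bool × Bool × Bool × Bool → Bool × Bool × Bool × Bool
  | [], m => m
  | c :: rest, m =>
      if pvFirst.contains c then
        let m' := (pvStep pvKw1 (c :: rest) m.1, pvStep pvKw2 (c :: rest) m.2.1,
                   pvStep pvKw3 (c :: rest) m.2.2.1, pvStep pvKw4 (c :: rest) m.2.2.2)
        if m'.1 && m'.2.1 && m'.2.2.1 && m'.2.2.2 then m' else pvScan rest m'
      else pvScan rest m

def identify_safety_considerations_py_alt (entities : List String) (expanded_concepts : List String) : List String :=
  let haystack := (PySem.Str.lower (PySem.Str.join " " (entities ++ expanded_concepts))).toList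
  let m := pvScan haystack (false, false, false, false)
  (([m.1, m.2.1, m.2.2.1, m.2.2.2].zip pvWarnings).filterMap
    (fun p => if p.1 then some p.2 else none))

-- ===== PRECONDITION & SPEC =====
def Spec_identify_safety_considerations_py (entities : List String) (expanded_concepts : List String) (out : List String) : Prop := out = identify_safety_considerations_py_alt entities expanded_concepts
instance (entities : List String) (expanded_concepts : List String) (out : List String) : Decidable (Spec_identify_safety_considerations_py entities expanded_concepts out) := by unfold Spec_identify_safety_considerations_py; infer_instance

-- ===== CLAIM (what is proved, stated in full; the proofs are below) =====
def Claim_equal_identify_safety_considerations_py : Prop := ∀ (entities : List String) (expanded_concepts : List String), Dom_identify_safety_considerations_py entities expanded_concepts → Spec_identify_safety_considerations_py entities expanded_concepts (identify_safety_considerations_py entities expanded_concepts)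

-- ===== LEMMAS AND PROOFS =====

-- scanning one flag over all suffixes with pvStep ≡ "some keyword occurs in the text"
def pvScan1 (kws : List String) : List Char → Bool → Bool
  | [], m => m
  | c :: rest, m => pvScan1 kws rest (pvStep kws (c :: rest) m)

lemma pvStep_eq (kws : List String) (suf : List Char) (m : Bool) :
    pvStep kws suf m = (m || kws.any (fun k => PySem.Chars.startswith suf k.toList)) := by
  cases m
  · cases h : kws.any (fun k => PySem.Chars.startswith suf k.toList) <;> simp [pvStep, h]
  · simp [pvStep]

-- once a flag is true it stays true
lemma pvScan1_true (kws : List String) (s : List Char) : pvScan1 kws s true = true := by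
  induction s with
  | nil => rfl
  | cons c rest ih => simpa [pvScan1, pvStep] using ih

-- a keyword cannot start at a position whose character differs from its first character
lemma pvSw_false (c d : Char) (rest : List Char) (h : ¬ c = d) (k : List Char) :
    PySem.Chars.startswith (c :: rest) (d :: k) = false := by
  rw [Bool.eq_false_iff]
  intro hT
  rw [PySem.Chars.startswith_iff] at hT
  obtain ⟨t, ht⟩ := hT
  simp only [List.cons_append, List.cons.injEq] at ht
  exact h ht.1.symm

-- at a skipped position (character not in _FIRST) no flag changes
lemma pvStep_skip (kws : List String) (c : Char) (rest : List Char) (m : Bool)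
    (hkw : kws = pvKw1 ∨ kws = pvKw2 ∨ kws = pvKw3 ∨ kws = pvKw4)
    (hc : pvFirst.contains c = false) :
    pvStep kws (c :: rest) m = m := by
  have hne : ¬ c = 'e' ∧ ¬ c = 'h' ∧ ¬ c = 'p' ∧ ¬ c = 'r' ∧ ¬ c = 'm' ∧
      ¬ c = 'c' ∧ ¬ c = 'f' ∧ ¬ c = 'o' := by
    simpa [pvFirst, PySem.Set.ofList, PySem.Set.add, PySem.Set.contains, List.contains_cons]
      using hc
  obtain ⟨h1, h2, h3, h4, h5, h6, h7, h8⟩ := hne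
  rcases hkw with h | h | h | h <;> subst h
  · simp [pvStep, pvKw1, pvSw_false c 'e' rest h1, pvSw_false c 'h' rest h2,
      pvSw_false c 'p' rest h3]
  · simp [pvStep, pvKw2, pvSw_false c 'p' rest h3, pvSw_false c 'h' rest h2]
  · simp [pvStep, pvKw3, pvSw_false c 'r' rest h4, pvSw_false c 'm' rest h5,
      pvSw_false c 'p' rest h3]
  · simp [pvStep, pvKw4, pvSw_false c 'c' rest h6, pvSw_false c 'f' rest h7,
      pvSw_false c 'o' rest h8]

lemma pvScan_eq_scan1 (s : List Char) (m : Bool × Bool × Bool × Bool) :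
    pvScan s m = (pvScan1 pvKw1 s m.1, pvScan1 pvKw2 s m.2.1,
                  pvScan1 pvKw3 s m.2.2.1, pvScan1 pvKw4 s m.2.2.2) := by
  induction s generalizing m with
  | nil => simp [pvScan, pvScan1]
  | cons c rest ih =>
      by_cases hc : pvFirst.contains c = true
      · rw [pvScan]
        simp only [hc, if_true]
        by_cases hall : (pvStep pvKw1 (c :: rest) m.1 && pvStep pvKw2 (c :: rest) m.2.1 &&
            pvStep pvKw3 (c :: rest) m.2.2.1 && pvStep pvKw4 (c :: rest) m.2.2.2) = true
        · simp only [Bool.and_eq_true] at hall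
          obtain ⟨⟨⟨e1, e2⟩, e3⟩, e4⟩ := hall
          simp [e1, e2, e3, e4, pvScan1, pvScan1_true]
        · simp only [Bool.and_eq_true] at hall
          simp only [pvScan1]
          rw [if_neg (by simpa [Bool.and_eq_true] using hall), ih]
      · rw [Bool.not_eq_true] at hc
        rw [pvScan]
        simp only [hc, Bool.false_eq_true, if_false]
        rw [ih, pvScan1, pvScan1, pvScan1, pvScan1,
          pvStep_skip pvKw1 c rest _ (by tauto) hc, pvStep_skip pvKw2 c rest _ (by tauto) hc,
          pvStep_skip pvKw3 c rest _ (by tauto) hc, pvStep_skip pvKw4 c rest _ (by tauto) hc]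

lemma pvScan1_eq (kws : List String) (h : ∀ k ∈ kws, k.toList ≠ []) (s : List Char) (m : Bool) :
    pvScan1 kws s m = (m || kws.any (fun k => PySem.Chars.isIn k.toList s)) := by
  induction s generalizing m with
  | nil =>
      rw [Bool.eq_iff_iff]
      simp only [pvScan1, Bool.or_eq_true, List.any_eq_true, PySem.Chars.isIn_iff_infix]
      constructor
      · exact Or.inl
      · rintro (hm | ⟨k, hk, hinf⟩)
        · exact hm
        · exact absurd (List.eq_nil_of_infix_nil hinf) (h k hk)
  | cons c rest ih =>
      rw [pvScan1, ih, pvStep_eq, Bool.eq_iff_iff]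
      simp only [Bool.or_eq_true, List.any_eq_true, PySem.Chars.isIn_iff_infix,
        PySem.Chars.startswith_iff, List.infix_cons_iff]
      aesop

lemma pvScan1_iff (kws : List String) (h : ∀ k ∈ kws, k.toList ≠ []) (hay : String) :
    pvScan1 kws hay.toList false = kws.any (fun k => PySem.Str.isIn k hay) := by
  rw [pvScan1_eq kws h, Bool.false_or]
  simp [PySem.Str.isIn_eq]

-- ===== VERDICT (by name: the statement is the Claim_ definition above) =====
theorem identify_safety_considerations_py_spec : Claim_equal_identify_safety_considerations_py := by
  intro entities expanded_concepts _
  simp only [Spec_identify_safety_considerations_py, identify_safety_considerations_py,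
    identify_safety_considerations_py_alt, pvScan_eq_scan1]
  rw [pvScan1_iff pvKw1 (by decide), pvScan1_iff pvKw2 (by decide),
    pvScan1_iff pvKw3 (by decide), pvScan1_iff pvKw4 (by decide)]
  simp only [pvKw1, pvKw2, pvKw3, pvKw4, pvWarnings]
  split_ifs <;> simp_all [List.zip, List.zipWith, List.filterMap]
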